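-- pv_equiv track=rewrite | github.com/JUNGEEYOU/Algorithm-Problems | binary_search/programmers/64062.py | solution
-- ===== SOURCE A (Python) =====
-- def cnt(target, stones, k):
--     now = -1
--     next = 0
--     while next != len(stones):
--         if stones[next] >= target:   # 해당 인원인 모두 건너면
--             now = next
--             next += 1
--         else:   # 해당 인원이 못 건너면
--             next += 1
--             if next - now > k:
--                 return False
--     return True
--
-- def solution(stones, k):
--     answer = 0
--     left = 1
--     right = 200000000
--     while left <= right:
--         mid = (left + right) // 2
--         if cnt(mid, stones, k):
--             answer = mid
--             left = mid + 1
--         else: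
--             right = mid - 1
--
--     return answer
-- ===== SOURCE B (Python) =====
-- def solution(stones, k):
--     # One pass: the answer is the minimum over all windows of k consecutive stones
--     # of that window's maximum, clamped into [0, 200000000].  Window maxima are read
--     # off in O(1) each from per-block prefix maxima and suffix maxima (blocks of size k).
--     n = len(stones)
--     CAP = 200000000
--     pre = []            # pre[i] = max of stones from the start of i's block through i
--     for i in range(n):
--         pre.append(stones[i] if i % k == 0 else max(pre[i - 1], stones[i]))
--     suf = [0] * n       # suf[i] = max of stones from i through the end of i's block
--     for i in range(n - 1, -1, -1):
--         suf[i] = stones[i] if (i % k == k - 1 or i == n - 1) else max(suf[i + 1], stones[i])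
--     best = CAP
--     for l in range(n - k + 1):
--         m = max(suf[l], pre[l + k - 1])
--         if m < best:
--             best = m
--     return best if best > 0 else 0
-- ===== Notes on version B (the rewrite author's own statement) =====
-- stated objective: faster
-- what changed: Replaces the binary search over the answer range (which re-scans all stones for each probe) with a single-pass computation of the minimum over all k-windows of the window maximum, read off in O(1) per window from per-block prefix/suffix maxima, then clamped into [0, 200000000].
-- outside the precondition, e.g. on solution([5], 0): A returns 5, B raises ZeroDivisionError; on solution([], 0): A returns 200000000, B raises IndexError; on solution([5], -1): A returns 5, B raises IndexError
import Mathlib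
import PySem

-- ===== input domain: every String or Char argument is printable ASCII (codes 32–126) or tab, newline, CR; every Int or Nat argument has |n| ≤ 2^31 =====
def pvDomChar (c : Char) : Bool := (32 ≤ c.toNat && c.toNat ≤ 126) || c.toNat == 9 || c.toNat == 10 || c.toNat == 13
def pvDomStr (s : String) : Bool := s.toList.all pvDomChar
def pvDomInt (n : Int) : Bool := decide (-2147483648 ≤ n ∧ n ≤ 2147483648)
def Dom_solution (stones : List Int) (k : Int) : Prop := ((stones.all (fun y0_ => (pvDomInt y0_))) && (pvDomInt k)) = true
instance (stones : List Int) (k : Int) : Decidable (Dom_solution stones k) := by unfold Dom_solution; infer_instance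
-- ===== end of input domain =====

-- B replaces A's binary search over the answer range by one pass computing the minimum
-- of sliding-window maxima (per-block prefix/suffix maxima), clamped into [0, 2*10^8]; faster by a constant factor (fewer scans).


-- ===== PORT A =====
-- the while loop of cnt: state (now, next); stones[next] is in range on every reachable state
def cntGo (target : Int) (stones : List Int) (k : Int) (now : Int) (next : Nat) : Bool :=
  if _h : stones.length ≤ next then true
  else
    if target ≤ stones.getD next 0 then cntGo target stones k next (next + 1)
    else if k < (next : Int) + 1 - now then false
    else cntGo target stones k now (next + 1)
termination_by stones.length - next

def cnt (target : Int) (stones : List Int) (k : Int) : Bool :=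
  cntGo target stones k (-1) 0

-- the binary-search while loop of solution
def solGo (stones : List Int) (k : Int) (answer left right : Int) : Int :=
  if _h : left ≤ right then
    let mid := PySem.Int.floordiv (left + right) 2
    if cnt mid stones k then solGo stones k mid (mid + 1) right
    else solGo stones k answer left (mid - 1)
  else answer
termination_by (right + 1 - left).toNat
decreasing_by
  · have := PySem.Int.floordiv_two_mid_bounds _h; omega
  · have := PySem.Int.floordiv_two_mid_bounds _h; omega

def solution (stones : List Int) (k : Int) : Int :=
  solGo stones k 0 1 200000000

-- ===== PORT B =====
-- pre[i] = max of stones from the start of i's block (blocks of size k) through i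
def preLoop (stones : List Int) (k : Int) : List Int :=
  (List.range stones.length).foldl
    (fun pre (i : Nat) =>
      pre ++ [if PySem.Int.mod (i : Int) k == 0 then stones.getD i 0
              else max (pre.getD (i - 1) 0) (stones.getD i 0)]) []

-- Python's descending loop 'for i in range(n-1, -1, -1)' filling suf; one call per index, i down to 0
def sufLoop (stones : List Int) (k : Int) (suf : List Int) (i : Nat) : List Int :=
  let v := if (PySem.Int.mod (i : Int) k == k - 1) || ((i : Int) == (stones.length : Int) - 1)
           then stones.getD i 0
           else max (suf.getD (i + 1) 0) (stones.getD i 0)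
  match i with
  | 0 => suf.set 0 v
  | j + 1 => sufLoop stones k (suf.set (j + 1) v) j

def solution_alt (stones : List Int) (k : Int) : Int :=
  let n := stones.length
  let pre := preLoop stones k
  let suf := match n with
             | 0 => ([] : List Int)          -- Python's filling loop body never runs
             | m + 1 => sufLoop stones k (List.replicate n 0) m
  let best := (PySem.List.pyRange 0 ((n : Int) - k + 1) 1).foldl
    (fun best l =>
      let m := max (suf.getD l.toNat 0) (pre.getD (l + k - 1).toNat 0)
      if m < best then m else best) 200000000
  if 0 < best then best else 0

-- ===== PRECONDITION & SPEC =====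
-- Pre_ restricts to the problem's natural domain k ≥ 1 (positive jump capacity / window size);
-- for k ≤ 0 B's block decomposition is meaningless and the Python B raises
-- (ZeroDivisionError or IndexError) while A returns a degenerate value.
def Pre_solution (stones : List Int) (k : Int) : Prop := 1 ≤ k
instance (stones : List Int) (k : Int) : Decidable (Pre_solution stones k) := by unfold Pre_solution; infer_instance
def pvWitness_solution : List Int × Int := ([2, 4, 5, 3, 2, 1, 4], 3)

def Spec_solution (stones : List Int) (k : Int) (out : Int) : Prop := out = solution_alt stones k
instance (stones : List Int) (k : Int) (out : Int) : Decidable (Spec_solution stones k out) := by unfold Spec_solution; infer_instance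

-- ===== CLAIM (what is proved, stated in full; the proofs are below) =====
def Claim_equal_solution : Prop := ∀ (stones : List Int) (k : Int), Dom_solution stones k → Pre_solution stones k → Spec_solution stones k (solution stones k)

-- ===== LEMMAS AND PROOFS =====

-- max of stones[l], stones[l+1], ..., stones[l+m]  (m+1 elements)
def segMax (stones : List Int) (l : Nat) : Nat → Int
  | 0 => stones.getD l 0
  | m + 1 => max (segMax stones l m) (stones.getD (l + m + 1) 0)

theorem le_segMax_iff (stones : List Int) (l m : Nat) (t : Int) :
    t ≤ segMax stones l m ↔ ∃ j, l ≤ j ∧ j ≤ l + m ∧ t ≤ stones.getD j 0 := by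
  induction m with
  | zero =>
      simp only [segMax]
      constructor
      · intro h; exact ⟨l, le_refl _, by omega, h⟩
      · rintro ⟨j, h1, h2, h3⟩
        have : j = l := by omega
        subst this; exact h3
  | succ m ih =>
      simp only [segMax, le_max_iff, ih]
      constructor
      · rintro (⟨j, h1, h2, h3⟩ | h)
        · exact ⟨j, h1, by omega, h3⟩
        · exact ⟨l + m + 1, by omega, by omega, h⟩
      · rintro ⟨j, h1, h2, h3⟩
        by_cases hj : j ≤ l + m
        · exact Or.inl ⟨j, h1, hj, h3⟩
        · have : j = l + m + 1 := by omega
          subst this; exact Or.inr h3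

theorem segMax_split (stones : List Int) (l a b : Nat) :
    segMax stones l (a + b + 1) = max (segMax stones l a) (segMax stones (l + a + 1) b) := by
  induction b with
  | zero => rfl
  | succ b ih =>
      have h1 : a + (b + 1) + 1 = (a + b + 1) + 1 := by omega
      rw [h1]
      show max (segMax stones l (a + b + 1)) (stones.getD (l + (a + b + 1) + 1) 0) = _
      rw [ih, max_assoc]
      have h2 : l + (a + b + 1) + 1 = (l + a + 1) + b + 1 := by omega
      rw [h2]; rfl

theorem segMax_cons_left (stones : List Int) (l m : Nat) :
    segMax stones l (m + 1) = max (stones.getD l 0) (segMax stones (l + 1) m) := by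
  have := segMax_split stones l 0 m
  simpa [segMax] using this

theorem mod_succ_cases (kn a : Nat) (hkn : 0 < kn) :
    (a + 1) % kn = a % kn + 1 ∨ (a % kn = kn - 1 ∧ (a + 1) % kn = 0) := by
  have hlt : a % kn < kn := Nat.mod_lt _ hkn
  rcases Nat.lt_or_ge (a % kn + 1) kn with h2 | h2
  · left
    conv_lhs => rw [← Nat.mod_add_div a kn]
    rw [show a % kn + kn * (a / kn) + 1 = (a % kn + 1) + (a / kn) * kn from by ring]
    rw [Nat.add_mul_mod_self_right, Nat.mod_eq_of_lt h2]
  · right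
    refine ⟨by omega, ?_⟩
    conv_lhs => rw [← Nat.mod_add_div a kn]
    rw [show a % kn + kn * (a / kn) + 1 = kn * (a / kn + 1) from by rw [Nat.mul_succ]; omega]
    exact Nat.mul_mod_right _ _

theorem getD_set_self (xs : List Int) (i : Nat) (v d : Int) (h : i < xs.length) :
    (xs.set i v).getD i d = v := by
  rw [List.getD_eq_getElem?_getD]; rw [List.getElem?_set_self (by simpa using h)]; rfl

theorem getD_set_ne (xs : List Int) (i j : Nat) (v d : Int) (h : i ≠ j) :
    (xs.set i v).getD j d = xs.getD j d := by
  rw [List.getD_eq_getElem?_getD, List.getElem?_set_ne h, ← List.getD_eq_getElem?_getD]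

-- A's inner while loop returns false iff a window of k consecutive too-small stones
-- starts after position now
theorem cntGo_false_iff (t : Int) (stones : List Int) (k : Int) (hk : 1 ≤ k)
    (now : Int) (next : Nat) (hnow : -1 ≤ now) (hnn : now < (next : Int))
    (hnext : next ≤ stones.length) (hgap : (next : Int) - now ≤ k)
    (hmid : ∀ j : Nat, now < (j : Int) → j < next → stones.getD j 0 < t) :
    (cntGo t stones k now next = false ↔
      ∃ i : Nat, now < (i : Int) ∧ i + k.toNat ≤ stones.length ∧
        ∀ j, i ≤ j → j < i + k.toNat → stones.getD j 0 < t) := by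
  have hkn : ((k.toNat : Int)) = k := Int.toNat_of_nonneg (by omega)
  rw [cntGo.eq_def]
  split
  case isTrue h =>
    simp only [Bool.true_eq_false, false_iff]
    rintro ⟨i, hi1, hi2, _⟩
    have : (i : Int) + k.toNat ≤ (next : Int) := by
      have : next = stones.length := by omega
      omega
    omega
  case isFalse h =>
    split
    case isTrue hge =>
      rw [cntGo_false_iff t stones k hk (next : Int) (next + 1)
        (by omega) (by push_cast; omega) (by omega) (by push_cast; omega)
        (by intro j hj1 hj2; omega)]
      constructor
      · rintro ⟨i, hi1, hi2, hi3⟩; exact ⟨i, by omega, hi2, hi3⟩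
      · rintro ⟨i, hi1, hi2, hi3⟩
        refine ⟨i, ?_, hi2, hi3⟩
        by_contra hle
        have hile : i ≤ next := by omega
        by_cases hcase : next < i + k.toNat
        · exact absurd hge (not_le.mpr (hi3 next hile hcase))
        · have : (i : Int) + k.toNat ≤ (next : Int) := by omega
          omega
    case isFalse hlt =>
      split
      case isTrue hbad =>
        simp only [true_iff]
        refine ⟨(now + 1).toNat, ?_, ?_, ?_⟩
        · have := Int.toNat_of_nonneg (by omega : (0:Int) ≤ now + 1); omega
        · have h1 := Int.toNat_of_nonneg (by omega : (0:Int) ≤ now + 1)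
          have : (((now + 1).toNat : Int)) + k.toNat ≤ ((next : Int)) + 1 := by omega
          push_cast at this ⊢; omega
        · intro j hj1 hj2
          have h1 := Int.toNat_of_nonneg (by omega : (0:Int) ≤ now + 1)
          have hj3 : j ≤ next := by
            have : (j : Int) < ((now + 1).toNat : Int) + k.toNat := by omega
            omega
          rcases Nat.lt_or_ge j next with hlt2 | hge2
          · exact hmid j (by omega) hlt2
          · have : j = next := by omega
            subst this; exact lt_of_not_ge hlt
      case isFalse hok =>
        rw [cntGo_false_iff t stones k hk now (next + 1) hnow (by push_cast; omega)
          (by omega) (by push_cast; omega)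
          (by intro j hj1 hj2
              rcases Nat.lt_or_ge j next with hlt2 | hge2
              · exact hmid j hj1 hlt2
              · have : j = next := by omega
                subst this; exact lt_of_not_ge hlt)]
termination_by stones.length - next
decreasing_by all_goals omega

-- cnt succeeds iff every window of k consecutive stones contains a stone ≥ t
theorem cnt_true_iff (t : Int) (stones : List Int) (k : Int) (hk : 1 ≤ k) :
    (cnt t stones k = true ↔
      ∀ l : Nat, l + k.toNat ≤ stones.length → t ≤ segMax stones l (k.toNat - 1)) := by
  have hkn : ((k.toNat : Int)) = k := Int.toNat_of_nonneg (by omega)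
  have h := cntGo_false_iff t stones k hk (-1) 0 (by omega) (by omega) (by omega) (by omega)
    (by intro j hj1 hj2; omega)
  rw [show cnt t stones k = cntGo t stones k (-1) 0 from rfl]
  constructor
  · intro htrue l hl
    rw [le_segMax_iff]
    by_contra hno
    simp only [not_exists, not_and, not_le] at hno
    have : cntGo t stones k (-1) 0 = false := by
      rw [h]
      exact ⟨l, by omega, hl, fun j hj1 hj2 => hno j hj1 (by omega)⟩
    simp [this] at htrue
  · intro hall
    by_contra hfalse
    have : cntGo t stones k (-1) 0 = false := by
      cases hcg : cntGo t stones k (-1) 0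
      · rfl
      · exact absurd hcg hfalse
    rw [h] at this
    obtain ⟨i, _, hi2, hi3⟩ := this
    have := hall i hi2
    rw [le_segMax_iff] at this
    obtain ⟨j, hj1, hj2, hj3⟩ := this
    exact absurd hj3 (not_le.mpr (hi3 j hj1 (by omega)))

-- the binary-search loop returns the value characterised by these four properties
theorem solGo_spec (stones : List Int) (k : Int)
    (hmono : ∀ t t' : Int, t ≤ t' → cnt t' stones k = true → cnt t stones k = true)
    (a l r : Int) (ha : a = l - 1) (h0 : 0 ≤ a) (hlr : l ≤ r + 1) (hr : r ≤ 200000000)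
    (hfeas : a = 0 ∨ cnt a stones k = true)
    (habove : ∀ t, r < t → t ≤ 200000000 → cnt t stones k = false) :
    0 ≤ solGo stones k a l r ∧ solGo stones k a l r ≤ 200000000 ∧
      (solGo stones k a l r = 0 ∨ cnt (solGo stones k a l r) stones k = true) ∧
      (∀ t, solGo stones k a l r < t → t ≤ 200000000 → cnt t stones k = false) := by
  rw [solGo.eq_def]
  split
  case isTrue h =>
    have hmid := PySem.Int.floordiv_two_mid_bounds h
    show 0 ≤ (if cnt (PySem.Int.floordiv (l + r) 2) stones k then _ else _) ∧ _
    by_cases hc : cnt (PySem.Int.floordiv (l + r) 2) stones k = true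
    · rw [if_pos hc]
      exact solGo_spec stones k hmono (PySem.Int.floordiv (l + r) 2)
        (PySem.Int.floordiv (l + r) 2 + 1) r (by omega) (by omega) (by omega) hr (Or.inr hc) habove
    · rw [if_neg hc]
      refine solGo_spec stones k hmono a l (PySem.Int.floordiv (l + r) 2 - 1) ha h0 (by omega)
        (by omega) hfeas ?_
      intro t ht1 ht2
      rcases le_or_gt t r with htr | htr
      · cases hct : cnt t stones k
        · rfl
        · exact absurd (hmono _ _ (by omega) hct) hc
      · exact habove t htr ht2
  case isFalse h =>
    refine ⟨h0, by omega, hfeas, ?_⟩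
    intro t ht1 ht2
    exact habove t (by omega) ht2
termination_by (r + 1 - l).toNat
decreasing_by all_goals omega

theorem char_unique (stones : List Int) (k : Int) (w₁ w₂ : Int)
    (h₁ : 0 ≤ w₁ ∧ w₁ ≤ 200000000 ∧ (w₁ = 0 ∨ cnt w₁ stones k = true) ∧
          (∀ t, w₁ < t → t ≤ 200000000 → cnt t stones k = false))
    (h₂ : 0 ≤ w₂ ∧ w₂ ≤ 200000000 ∧ (w₂ = 0 ∨ cnt w₂ stones k = true) ∧
          (∀ t, w₂ < t → t ≤ 200000000 → cnt t stones k = false)) : w₁ = w₂ := by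
  obtain ⟨h10, h1c, h1f, h1a⟩ := h₁
  obtain ⟨h20, h2c, h2f, h2a⟩ := h₂
  rcases lt_trichotomy w₁ w₂ with hlt | heq | hgt
  · rcases h2f with h | h
    · omega
    · rw [h1a w₂ hlt h2c] at h; exact absurd h (by simp)
  · exact heq
  · rcases h1f with h | h
    · omega
    · rw [h2a w₁ hgt h1c] at h; exact absurd h (by simp)

-- spec of the pre array (prefix maxima within blocks of size k)
theorem preAux_spec (stones : List Int) (k : Int) (hk : 1 ≤ k) (n : Nat) (hn : n ≤ stones.length) :
    ((List.range n).foldl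
      (fun pre (i : Nat) =>
        pre ++ [if PySem.Int.mod (i : Int) k == 0 then stones.getD i 0
                else max (pre.getD (i - 1) 0) (stones.getD i 0)]) []).length = n ∧
    ∀ i, i < n → ((List.range n).foldl
      (fun pre (i : Nat) =>
        pre ++ [if PySem.Int.mod (i : Int) k == 0 then stones.getD i 0
                else max (pre.getD (i - 1) 0) (stones.getD i 0)]) []).getD i 0 =
        segMax stones (i - i % k.toNat) (i % k.toNat) := by
  have hkn : ((k.toNat : Int)) = k := Int.toNat_of_nonneg (by omega)
  have hkpos : 0 < k.toNat := by omega
  induction n with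
  | zero => simp
  | succ n ih =>
    obtain ⟨ihlen, ihval⟩ := ih (by omega)
    rw [List.range_succ, List.foldl_append]
    set P := (List.range n).foldl
      (fun pre (i : Nat) =>
        pre ++ [if PySem.Int.mod (i : Int) k == 0 then stones.getD i 0
                else max (pre.getD (i - 1) 0) (stones.getD i 0)]) [] with hP
    simp only [List.foldl_cons, List.foldl_nil]
    constructor
    · simp [ihlen]
    · intro i hi
      rcases Nat.lt_or_ge i n with hin | hin
      · rw [List.getD_append _ _ _ _ (by omega)]
        exact ihval i hin
      · have hieq : i = n := by omega
        subst hieq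
        have hget : (P ++ [if PySem.Int.mod (i : Int) k == 0 then stones.getD i 0
                else max (P.getD (i - 1) 0) (stones.getD i 0)]).getD i 0 =
            (if PySem.Int.mod (i : Int) k == 0 then stones.getD i 0
                else max (P.getD (i - 1) 0) (stones.getD i 0)) := by
          rw [List.getD_eq_getElem?_getD, List.getElem?_append_right ihlen.le, ihlen]
          simp
        rw [hget]
        have hmodcast : PySem.Int.mod (i : Int) k = ((i % k.toNat : Nat) : Int) := by
          conv_lhs => rw [← hkn]
          rw [PySem.Int.mod_natCast]
        rw [hmodcast]
        by_cases hz : i % k.toNat = 0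
        · simp [hz, segMax]
        · have hne : (((i % k.toNat : Nat) : Int) == (0 : Int)) = false := by
            simp only [beq_eq_false_iff_ne, ne_eq, Int.natCast_eq_zero]; exact hz
          rw [hne]
          simp only [Bool.false_eq_true, if_false]
          have hipos : 1 ≤ i := by
            by_contra hc
            have : i = 0 := by omega
            subst this; simp at hz
          have hms : i % k.toNat = (i - 1) % k.toNat + 1 := by
            rcases mod_succ_cases k.toNat (i - 1) hkpos with h | ⟨h, h2⟩
            · rw [Nat.sub_add_cancel hipos] at h; exact h
            · rw [Nat.sub_add_cancel hipos] at h2; exact absurd h2 hz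
          rw [ihval (i - 1) (by omega), hms]
          have hble : (i - 1) % k.toNat ≤ i - 1 := Nat.mod_le _ _
          have hbs : i - ((i - 1) % k.toNat + 1) = (i - 1) - (i - 1) % k.toNat := by omega
          rw [hbs]
          show _ = max (segMax stones ((i-1) - (i-1) % k.toNat) ((i-1) % k.toNat))
                (stones.getD (((i-1) - (i-1) % k.toNat) + ((i-1) % k.toNat) + 1) 0)
          have hidx : ((i-1) - (i-1) % k.toNat) + ((i-1) % k.toNat) + 1 = i := by omega
          rw [hidx]

theorem preLoop_spec (stones : List Int) (k : Int) (hk : 1 ≤ k) :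
    (preLoop stones k).length = stones.length ∧
    ∀ i, i < stones.length →
      (preLoop stones k).getD i 0 = segMax stones (i - i % k.toNat) (i % k.toNat) := by
  unfold preLoop
  exact preAux_spec stones k hk stones.length (le_refl _)

-- bend j: last index of j's block, clipped to the end of the list
def bendN (stones : List Int) (kn j : Nat) : Nat :=
  min (j - j % kn + (kn - 1)) (stones.length - 1)

def sufValExpr (stones : List Int) (k : Int) (suf : List Int) (i : Nat) : Int :=
  if (PySem.Int.mod (i : Int) k == k - 1) || ((i : Int) == (stones.length : Int) - 1)
  then stones.getD i 0
  else max (suf.getD (i + 1) 0) (stones.getD i 0)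

theorem sufLoop_zero_eq (stones : List Int) (k : Int) (suf : List Int) :
    sufLoop stones k suf 0 = suf.set 0 (sufValExpr stones k suf 0) := rfl

theorem sufLoop_succ_eq (stones : List Int) (k : Int) (suf : List Int) (m : Nat) :
    sufLoop stones k suf (m + 1) =
      sufLoop stones k (suf.set (m + 1) (sufValExpr stones k suf (m + 1))) m := rfl

theorem sufVal (stones : List Int) (k : Int) (hk : 1 ≤ k) (i : Nat)
    (hi : i < stones.length) (suf : List Int)
    (hnext : i + 1 < stones.length →
      suf.getD (i + 1) 0 = segMax stones (i + 1) (bendN stones k.toNat (i + 1) - (i + 1))) :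
    sufValExpr stones k suf i = segMax stones i (bendN stones k.toNat i - i) := by
  unfold sufValExpr
  have hkn : ((k.toNat : Int)) = k := Int.toNat_of_nonneg (by omega)
  have hkpos : 0 < k.toNat := by omega
  have hmodlt : i % k.toNat < k.toNat := Nat.mod_lt _ hkpos
  have hmodle : i % k.toNat ≤ i := Nat.mod_le _ _
  have hmodcast : PySem.Int.mod (i : Int) k = ((i % k.toNat : Nat) : Int) := by
    conv_lhs => rw [← hkn]
    rw [PySem.Int.mod_natCast]
  rw [hmodcast]
  by_cases hcond : i % k.toNat = k.toNat - 1 ∨ i = stones.length - 1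
  · have hb : ((((i % k.toNat : Nat) : Int) == k - 1) || ((i : Int) == (stones.length : Int) - 1)) = true := by
      rcases hcond with hc | hc
      · have hx : (((i % k.toNat : Nat) : Int) == k - 1) = true := by
          simp only [beq_iff_eq]; omega
        rw [hx, Bool.true_or]
      · have hx : ((i : Int) == (stones.length : Int) - 1) = true := by
          simp only [beq_iff_eq]; omega
        rw [hx, Bool.or_true]
    rw [hb, if_pos rfl]
    have hbend : bendN stones k.toNat i = i := by
      unfold bendN
      rcases hcond with hc | hc <;> omega
    rw [hbend, Nat.sub_self]
    rfl
  · obtain ⟨hc1, hc2⟩ := not_or.mp hcond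
    have hb : ((((i % k.toNat : Nat) : Int) == k - 1) || ((i : Int) == (stones.length : Int) - 1)) = false := by
      have hx : (((i % k.toNat : Nat) : Int) == k - 1) = false := by
        simp only [beq_eq_false_iff_ne, ne_eq]; omega
      have hy : ((i : Int) == (stones.length : Int) - 1) = false := by
        simp only [beq_eq_false_iff_ne, ne_eq]; omega
      rw [hx, hy]; rfl
    rw [hb]
    simp only [Bool.false_eq_true, if_false]
    have hmods : (i + 1) % k.toNat = i % k.toNat + 1 := by
      rcases mod_succ_cases k.toNat i hkpos with h | ⟨h, _⟩
      · exact h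
      · omega
    have hbend1 : bendN stones k.toNat (i + 1) = bendN stones k.toNat i := by
      unfold bendN; rw [hmods]
      congr 1
      omega
    have hbgt : i < bendN stones k.toNat i := by
      unfold bendN
      omega
    rw [hnext (by omega), hbend1]
    have hd : bendN stones k.toNat i - i = (bendN stones k.toNat i - (i + 1)) + 1 := by omega
    rw [hd, segMax_cons_left, max_comm]

theorem sufLoop_spec (stones : List Int) (k : Int) (hk : 1 ≤ k) (i : Nat)
    (hi : i < stones.length) (suf : List Int) (hlen : suf.length = stones.length)
    (hhi : ∀ j, i < j → j < stones.length →
      suf.getD j 0 = segMax stones j (bendN stones k.toNat j - j)) :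
    (sufLoop stones k suf i).length = stones.length ∧
    ∀ j, j < stones.length →
      (sufLoop stones k suf i).getD j 0 = segMax stones j (bendN stones k.toNat j - j) := by
  have hvaleq := sufVal stones k hk i hi suf (fun h => hhi (i + 1) (by omega) h)
  match i with
  | 0 =>
    rw [sufLoop_zero_eq]
    refine ⟨by simpa using hlen, ?_⟩
    intro j hj
    rcases Nat.eq_zero_or_pos j with hj0 | hj0
    · subst hj0
      rw [getD_set_self _ _ _ _ (by omega), hvaleq]
    · rw [getD_set_ne _ _ _ _ _ (by omega)]
      exact hhi j (by omega) hj
  | m + 1 =>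
    rw [sufLoop_succ_eq]
    apply sufLoop_spec stones k hk m (by omega) _ (by simpa using hlen)
    intro j hj1 hj2
    rcases Nat.eq_or_lt_of_le hj1 with hje | hje
    · rw [← hje] at hj2 ⊢
      rw [getD_set_self _ _ _ _ (by omega), hvaleq]
    · rw [getD_set_ne _ _ _ _ _ (by omega)]
      exact hhi j (by omega) hj2

-- the suf list exactly as solution_alt builds it
def sufList (stones : List Int) (k : Int) : List Int :=
  match stones.length with
  | 0 => ([] : List Int)
  | m + 1 => sufLoop stones k (List.replicate stones.length 0) m

theorem sufList_getD (stones : List Int) (k : Int) (hk : 1 ≤ k) (j : Nat)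
    (hj : j < stones.length) :
    (sufList stones k).getD j 0 = segMax stones j (bendN stones k.toNat j - j) := by
  unfold sufList
  split
  case h_1 h0 => omega
  case h_2 m hm =>
    refine (sufLoop_spec stones k hk m (by omega) (List.replicate stones.length 0)
      (by simp) ?_).2 j hj
    intro j' hj1 hj2
    omega

theorem window_max (stones : List Int) (kn : Nat) (hk : 1 ≤ kn) (l : Nat)
    (h : l + kn ≤ stones.length) :
    max (segMax stones l (bendN stones kn l - l))
        (segMax stones ((l + kn - 1) - (l + kn - 1) % kn) ((l + kn - 1) % kn)) =
      segMax stones l (kn - 1) := by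
  set n := stones.length with hn
  set r := l + kn - 1 with hr
  have hrn : r < n := by omega
  have hrr : r % kn < kn := Nat.mod_lt _ (by omega)
  obtain ⟨B, hB, hqB⟩ : ∃ B, r % kn + B = r ∧ ∃ q, B = kn * q :=
    ⟨kn * (r / kn), Nat.mod_add_div r kn, r / kn, rfl⟩
  obtain ⟨qq, hq⟩ := hqB
  rcases Nat.eq_or_lt_of_le (Nat.le_of_lt_succ (by omega : r % kn < kn - 1 + 1)) with hcase | hcase
  · have hbl : r - r % kn = l := by omega
    have hlmod : l % kn = 0 := by
      have hlB : l = kn * qq := by omega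
      rw [hlB]; exact Nat.mul_mod_right _ _
    have hbend : bendN stones kn l = r := by
      unfold bendN; rw [hlmod]; omega
    rw [hbend, hbl, hcase, show r - l = kn - 1 from by omega]
    exact max_self _
  · have hq1 : 1 ≤ qq := by
      rcases Nat.eq_zero_or_pos qq with h0 | h0
      · rw [h0, Nat.mul_zero] at hq; omega
      · exact h0
    have hC : B = kn * (qq - 1) + kn := by
      rw [hq, show kn * qq = kn * ((qq - 1) + 1) from by rw [Nat.sub_add_cancel hq1], Nat.mul_succ]
    have hlC : l = kn * (qq - 1) + (r % kn + 1) := by omega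
    have hlmod : l % kn = r % kn + 1 := by
      rw [hlC, Nat.mul_add_mod]
      exact Nat.mod_eq_of_lt (by omega)
    have hbend : bendN stones kn l = (r - r % kn) - 1 := by
      unfold bendN; rw [hlmod]; omega
    rw [hbend]
    have hsplit := segMax_split stones l ((r - r % kn) - 1 - l) (r % kn)
    rw [show l + ((r - r % kn) - 1 - l) + 1 = r - r % kn from by omega] at hsplit
    rw [show ((r - r % kn) - 1 - l) + r % kn + 1 = kn - 1 from by omega] at hsplit
    exact hsplit.symm

theorem foldl_min_iff (f : Nat → Int) (N : Nat) (c t : Int) :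
    t ≤ (List.range N).foldl (fun b j => if f j < b then f j else b) c ↔
      t ≤ c ∧ ∀ j, j < N → t ≤ f j := by
  induction N with
  | zero => simp
  | succ N ih =>
    rw [List.range_succ, List.foldl_append]
    simp only [List.foldl_cons, List.foldl_nil]
    rw [show (if f N < (List.range N).foldl (fun b j => if f j < b then f j else b) c
          then f N else (List.range N).foldl (fun b j => if f j < b then f j else b) c) =
        min (f N) ((List.range N).foldl (fun b j => if f j < b then f j else b) c) from by
      split_ifs <;> omega]
    rw [le_min_iff, ih]
    constructor
    · rintro ⟨h1, h2, h3⟩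
      refine ⟨h2, fun j hj => ?_⟩
      rcases Nat.lt_or_ge j N with hjN | hjN
      · exact h3 j hjN
      · have : j = N := by omega
        subst this; exact h1
    · rintro ⟨h1, h2⟩
      exact ⟨h2 N (by omega), h1, fun j hj => h2 j (by omega)⟩

-- B's accumulated minimum, exactly as solution_alt computes it
def bestExpr (stones : List Int) (k : Int) : Int :=
  (PySem.List.pyRange 0 ((stones.length : Int) - k + 1) 1).foldl
    (fun best l =>
      let m := max ((sufList stones k).getD l.toNat 0)
                   ((preLoop stones k).getD (l + k - 1).toNat 0)
      if m < best then m else best) 200000000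

theorem solution_alt_eq (stones : List Int) (k : Int) :
    solution_alt stones k = if 0 < bestExpr stones k then bestExpr stones k else 0 := rfl

theorem le_bestExpr_iff (stones : List Int) (k : Int) (hk : 1 ≤ k) (t : Int) :
    t ≤ bestExpr stones k ↔
      t ≤ 200000000 ∧ ∀ l : Nat, l + k.toNat ≤ stones.length →
        t ≤ segMax stones l (k.toNat - 1) := by
  have hkn : ((k.toNat : Int)) = k := Int.toNat_of_nonneg (by omega)
  unfold bestExpr
  rcases Nat.lt_or_ge stones.length k.toNat with hnk | hnk
  · rw [PySem.List.pyRange_one_eq_nil (by omega)]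
    simp only [List.foldl_nil]
    constructor
    · intro h; exact ⟨h, fun l hl => absurd hl (by omega)⟩
    · rintro ⟨h, _⟩; exact h
  · have hbound : (stones.length : Int) - k + 1 = ((stones.length - k.toNat + 1 : Nat) : Int) := by
      push_cast; omega
    rw [hbound, PySem.List.pyRange_one, show (((stones.length - k.toNat + 1 : Nat) : Int) - 0).toNat
        = stones.length - k.toNat + 1 from by omega, List.foldl_map]
    have hcong : (List.range (stones.length - k.toNat + 1)).foldl
        (fun (x : Int) (y : Nat) =>
          let m := max ((sufList stones k).getD ((0 : Int) + (y : Int)).toNat 0)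
                       ((preLoop stones k).getD ((0 : Int) + (y : Int) + k - 1).toNat 0)
          if m < x then m else x) 200000000 =
      (List.range (stones.length - k.toNat + 1)).foldl
        (fun (best : Int) (j : Nat) =>
          if segMax stones j (k.toNat - 1) < best then segMax stones j (k.toNat - 1) else best)
        200000000 := by
      apply PySem.List.foldl_congr_mem
      intro best j hj
      rw [List.mem_range] at hj
      have hjn : j + k.toNat ≤ stones.length := by omega
      have hc1 : ((0 : Int) + (j : Int)).toNat = j := by omega
      have hc2 : ((0 : Int) + (j : Int) + k - 1).toNat = j + k.toNat - 1 := by omega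
      show (let m := max ((sufList stones k).getD ((0 : Int) + (j : Int)).toNat 0)
                     ((preLoop stones k).getD ((0 : Int) + (j : Int) + k - 1).toNat 0)
            if m < best then m else best) = _
      rw [hc1, hc2]
      show (let m := max ((sufList stones k).getD j 0)
                     ((preLoop stones k).getD (j + k.toNat - 1) 0)
            if m < best then m else best) = _
      rw [show (let m := max ((sufList stones k).getD j 0)
                     ((preLoop stones k).getD (j + k.toNat - 1) 0)
            if m < best then m else best) =
          (if max ((sufList stones k).getD j 0) ((preLoop stones k).getD (j + k.toNat - 1) 0) < best
           then max ((sufList stones k).getD j 0) ((preLoop stones k).getD (j + k.toNat - 1) 0)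
           else best) from rfl]
      rw [sufList_getD stones k hk j (by omega)]
      rw [(preLoop_spec stones k hk).2 (j + k.toNat - 1) (by omega)]
      rw [show j + k.toNat - 1 - (j + k.toNat - 1) % k.toNat
            = (j + k.toNat - 1) - (j + k.toNat - 1) % k.toNat from rfl]
      rw [window_max stones k.toNat (by omega) j hjn]
    rw [hcong, foldl_min_iff]
    constructor
    · rintro ⟨h1, h2⟩
      exact ⟨h1, fun l hl => h2 l (by omega)⟩
    · rintro ⟨h1, h2⟩
      exact ⟨h1, fun j hj => h2 j (by omega)⟩

theorem alt_char (stones : List Int) (k : Int) (hk : 1 ≤ k) :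
    0 ≤ solution_alt stones k ∧ solution_alt stones k ≤ 200000000 ∧
      (solution_alt stones k = 0 ∨ cnt (solution_alt stones k) stones k = true) ∧
      (∀ t, solution_alt stones k < t → t ≤ 200000000 → cnt t stones k = false) := by
  rw [solution_alt_eq]
  have hbb := le_bestExpr_iff stones k hk
  have hble : bestExpr stones k ≤ 200000000 := ((hbb _).mp (le_refl _)).1
  by_cases hpos : 0 < bestExpr stones k
  · rw [if_pos hpos]
    refine ⟨by omega, hble, Or.inr ?_, ?_⟩
    · rw [cnt_true_iff _ _ _ hk]
      exact ((hbb _).mp (le_refl _)).2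
    · intro t ht1 ht2
      cases hct : cnt t stones k
      · rfl
      · exfalso
        rw [cnt_true_iff _ _ _ hk] at hct
        have := (hbb t).mpr ⟨ht2, hct⟩
        omega
  · rw [if_neg hpos]
    refine ⟨le_refl _, by omega, Or.inl rfl, ?_⟩
    intro t ht1 ht2
    cases hct : cnt t stones k
    · rfl
    · exfalso
      rw [cnt_true_iff _ _ _ hk] at hct
      have := (hbb t).mpr ⟨ht2, hct⟩
      omega

-- ===== VERDICT (by name: the statement is the Claim_ definition above) =====
theorem solution_spec : Claim_equal_solution := by
  unfold Claim_equal_solution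
  intro stones k _hdom hpre
  have hk : 1 ≤ k := hpre
  unfold Spec_solution
  have hmono : ∀ t t' : Int, t ≤ t' → cnt t' stones k = true → cnt t stones k = true := by
    intro t t' htt h'
    rw [cnt_true_iff _ _ _ hk] at h' ⊢
    intro l hl
    exact le_trans htt (h' l hl)
  have hA := solGo_spec stones k hmono 0 1 200000000 (by omega) (by omega) (by omega) (by omega)
    (Or.inl rfl) (fun t ht1 ht2 => absurd ht1 (by omega))
  have hB := alt_char stones k hk
  exact char_unique stones k _ _ hA hB
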